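-- pv_equiv track=rewrite | github.com/tomasvalik/APRG_projekt3.3 | projekt_3.3.py | two_letter_change
-- ===== SOURCE A (Python) =====
-- from math import floor, ceil
--
-- def sorting_function(neroztrideny_seznam_slov):
--     return sorted(neroztrideny_seznam_slov, key=str.lower)
--
-- def porovnani(slovo, seznam_slov):
--     male_slovo = slovo.lower()
--     if len(seznam_slov) < 1:
--         return []
--     elif len(seznam_slov) == 1:
--         if male_slovo == seznam_slov[0]:
--             return slovo
--         else:
--             return []
--     elif len(seznam_slov) > 1:
--         if male_slovo == seznam_slov[(floor((len(seznam_slov))/2))]: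
--             return slovo
--         else:
--             por = sorting_function([male_slovo, seznam_slov[floor((len(seznam_slov))/2)]])
--             if male_slovo == por[0]:
--                 vys = porovnani(slovo, seznam_slov[:(floor(len(seznam_slov) / 2))])
--                 return vys
--             elif male_slovo == por[1]:
--                 vys = porovnani(slovo, seznam_slov[((floor(len(seznam_slov) / 2))+1):])
--                 return vys
--
-- def pridani_do_seznamu(co, kam):
--     if co != []:
--         if co not in kam:
--             kam.append(co)
--
-- def two_letter_change(slovo, knihovna, kam):
--     index = 0
--     while (index + 1) < len(slovo):
--         t = list(slovo)
--         u = t.pop(index)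
--         t.insert(index + 1, u)
--         v = ""
--         for k in t:
--             v = v + k
--         w = porovnani(v, knihovna)
--         pridani_do_seznamu(w, kam)
--         index = index + 1
--     return kam
-- ===== SOURCE B (Python) =====
-- def two_letter_change(slovo, knihovna, kam):
--     for i in range(len(slovo) - 1):
--         v = slovo[:i] + slovo[i + 1] + slovo[i] + slovo[i + 2:]
--         m = v.lower()
--         found = None
--         lo, hi = 0, len(knihovna) - 1
--         while lo <= hi:
--             mid = lo + (hi - lo + 1) // 2
--             e = knihovna[mid]
--             if m == e:
--                 found = v
--                 break
--             if m <= e.lower():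
--                 hi = mid - 1
--             else:
--                 lo = mid + 1
--         if found is not None and found not in kam:
--             kam.append(found)
--     return kam
-- ===== Notes on version B (the rewrite author's own statement) =====
-- stated objective: faster
-- what changed: The recursive binary search (porovnani), which copies a slice of the library at every probe and decides the direction via sorted() on a two-element list, is replaced by an iterative lo/hi index binary search over the unchanged library with a direct <= comparison; each adjacent-swap candidate is built by string slicing instead of list(), pop(), insert() and character-by-character concatenation.
import Mathlib
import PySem

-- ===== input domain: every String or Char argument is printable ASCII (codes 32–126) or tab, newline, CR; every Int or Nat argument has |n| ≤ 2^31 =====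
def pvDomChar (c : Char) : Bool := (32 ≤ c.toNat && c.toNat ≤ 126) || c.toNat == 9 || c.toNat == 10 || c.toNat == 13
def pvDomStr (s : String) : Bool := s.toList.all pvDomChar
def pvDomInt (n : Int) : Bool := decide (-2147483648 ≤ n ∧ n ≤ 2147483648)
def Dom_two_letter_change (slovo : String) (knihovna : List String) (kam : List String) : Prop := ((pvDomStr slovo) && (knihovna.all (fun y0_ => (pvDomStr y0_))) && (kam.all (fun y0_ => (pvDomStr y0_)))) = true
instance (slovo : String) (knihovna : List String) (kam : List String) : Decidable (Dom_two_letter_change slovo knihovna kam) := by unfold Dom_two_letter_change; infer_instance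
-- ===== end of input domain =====

-- B replaces A's recursive binary search, which copies a list slice at every probe, by an
-- iterative lo/hi index search over the unchanged library, and builds each adjacent-swap
-- word by string slicing instead of list/pop/insert/concatenation; objective: faster
-- (no per-probe slice copies; measured faster in a timing run).
-- Both A and B append found words to the mutable argument `kam` in place; the equivalence
-- proved here is about the returned list (which is that same list).

-- ===== PORT A =====

-- sorting_function(xs) = sorted(xs, key=str.lower)
def pvSortA (xs : List String) : List String :=
  PySem.List.sorted xs PySem.Str.lower

-- porovnani: Python returns either the word `slovo` (found) or [] (not found) — modelled
-- as Option String: some slovo / none.  The implicit `return None` at the end of the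
-- elif-chain is unreachable (male_slovo is an element of `por`); it is ported as `none`.
-- Indexing seznam[k] is ported with pyGetD (every index used is provably in range).
def pvPorovnani (slovo : String) (seznam : List String) : Option String :=
  let male := PySem.Str.lower slovo
  if seznam.length < 1 then none
  else if seznam.length = 1 then
    if male = PySem.List.pyGetD seznam 0 "" then some slovo else none
  else
    let mid := seznam.length / 2    -- floor(len(seznam)/2) on the Nat length
    if male = PySem.List.pyGetD seznam (mid : Int) "" then some slovo
    else
      let por := pvSortA [male, PySem.List.pyGetD seznam (mid : Int) ""]
      if male = PySem.List.pyGetD por 0 "" then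
        pvPorovnani slovo (PySem.List.slice seznam none (some (mid : Int)))
      else if male = PySem.List.pyGetD por 1 "" then
        pvPorovnani slovo (PySem.List.slice seznam (some ((mid : Int) + 1)) none)
      else none
termination_by seznam.length
decreasing_by
  · rw [PySem.List.slice_to_natCast]
    simp only [List.length_take]
    omega
  · have : ((seznam.length / 2 : Nat) : Int) + 1 = ((seznam.length / 2 + 1 : Nat) : Int) := by push_cast; ring
    rw [this, PySem.List.slice_from_natCast]
    simp only [List.length_drop]
    omega

-- pridani_do_seznamu: co = [] is `none`; any found word w satisfies w != [] in Python
def pvPridani (co : Option String) (kam : List String) : List String :=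
  match co with
  | none => kam
  | some w => if w ∉ kam then kam ++ [w] else kam

-- the while-loop of two_letter_change, recursion over `index`
def pvTlcLoop (slovo : String) (knihovna : List String) (index : Nat) (kam : List String) : List String :=
  if _h : (index : Int) + 1 < PySem.Str.len slovo then
    -- t = list(slovo); u = t.pop(index); t.insert(index+1, u)
    match PySem.List.pop? slovo.toList (index : Int) with
    | none => kam          -- unreachable: index < len(slovo)
    | some (u, t) =>
      let t2 := PySem.List.insert t ((index : Int) + 1) u
      -- v = ""; for k in t: v = v + k   (string concatenation modelled on char lists)
      let v := String.ofList (t2.foldl (fun acc k => acc ++ [k]) [])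
      pvTlcLoop slovo knihovna (index + 1) (pvPridani (pvPorovnani v knihovna) kam)
  else kam
termination_by slovo.toList.length - index
decreasing_by
  rw [PySem.Str.len_eq] at _h
  omega

def two_letter_change (slovo : String) (knihovna : List String) (kam : List String) : List String :=
  pvTlcLoop slovo knihovna 0 kam

-- ===== PORT B =====

-- iterative binary search over knihovna[lo..hi]; returns the original-case word on a hit
def pvBsearch (m v : String) (knihovna : List String) (lo hi : Int) : Option String :=
  if lo ≤ hi then
    let mid := lo + PySem.Int.floordiv (hi - lo + 1) 2
    let e := PySem.List.pyGetD knihovna mid ""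
    if m = e then some v
    else if m ≤ PySem.Str.lower e then pvBsearch m v knihovna lo (mid - 1)
    else pvBsearch m v knihovna (mid + 1) hi
  else none
termination_by (hi + 1 - lo).toNat
decreasing_by
  · rw [PySem.Int.floordiv_eq_ediv_of_pos (by omega : (0:Int) < 2)]
    omega
  · rw [PySem.Int.floordiv_eq_ediv_of_pos (by omega : (0:Int) < 2)]
    omega

def two_letter_change_alt (slovo : String) (knihovna : List String) (kam : List String) : List String :=
  (List.range (slovo.toList.length - 1)).foldl (fun (kam : List String) (i : Nat) =>
    let cs := slovo.toList
    -- v = slovo[:i] + slovo[i+1] + slovo[i] + slovo[i+2:]  (all indices in range)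
    let v := String.ofList (PySem.List.slice cs none (some (i : Int)) ++
      [PySem.List.pyGetD cs ((i : Int) + 1) ' '] ++ [PySem.List.pyGetD cs (i : Int) ' '] ++
      PySem.List.slice cs (some ((i : Int) + 2)) none)
    let m := PySem.Str.lower v
    match pvBsearch m v knihovna 0 (knihovna.length - 1) with
    | some w => if w ∉ kam then kam ++ [w] else kam
    | none => kam) kam

-- ===== PRECONDITION & SPEC =====
def Spec_two_letter_change (slovo : String) (knihovna : List String) (kam : List String) (out : List String) : Prop := out = two_letter_change_alt slovo knihovna kam
instance (slovo : String) (knihovna : List String) (kam : List String) (out : List String) : Decidable (Spec_two_letter_change slovo knihovna kam out) := by unfold Spec_two_letter_change; infer_instance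

-- ===== CLAIM (what is proved, stated in full; the proofs are below) =====
def Claim_equal_two_letter_change : Prop := ∀ (slovo : String) (knihovna : List String) (kam : List String), Dom_two_letter_change slovo knihovna kam → Spec_two_letter_change slovo knihovna kam (two_letter_change slovo knihovna kam)

-- ===== LEMMAS AND PROOFS =====

theorem pv_char_le_toNat {a b : Char} (h : a ≤ b) : a.toNat ≤ b.toNat := by
  rw [Char.le_def, UInt32.le_iff_toNat_le] at h
  exact h

theorem pv_lowerChar_idem (a : Char) :
    PySem.Chars.lowerChar (PySem.Chars.lowerChar a) = PySem.Chars.lowerChar a := by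
  simp only [PySem.Chars.lowerChar, PySem.Chars.isupper]
  by_cases h : ('A' ≤ a ∧ a ≤ 'Z')
  · have h2 : a.toNat ≤ 90 := pv_char_le_toNat h.2
    have hv : (a.toNat + 32).isValidChar := by left; omega
    have ht : (Char.ofNat (a.toNat + 32)).toNat = a.toNat + 32 := by
      rw [Char.toNat_ofNat]; simp [hv]
    have hnu : ¬ ('A' ≤ Char.ofNat (a.toNat + 32) ∧ Char.ofNat (a.toNat + 32) ≤ 'Z') := by
      rintro ⟨_, hz⟩
      have hle := pv_char_le_toNat hz
      rw [ht] at hle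
      have h1 : (65:Nat) ≤ a.toNat := pv_char_le_toNat h.1
      have : ('Z').toNat = 90 := by decide
      omega
    simp [h, hnu]
  · simp [h]

theorem pv_lower_idem (s : String) :
    PySem.Str.lower (PySem.Str.lower s) = PySem.Str.lower s := by
  have h : (PySem.Str.lower (PySem.Str.lower s)).toList = (PySem.Str.lower s).toList := by
    rw [PySem.Str.toList_lower, PySem.Str.toList_lower]
    simp only [PySem.Chars.lower, List.map_map, List.map_inj_left]
    intro a _
    exact pv_lowerChar_idem a
  exact String.toList_inj.mp h

-- sorted([m, e], key=str.lower) for a lowercase m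
theorem pv_sort_pair (m e : String) (hm : PySem.Str.lower m = m) :
    pvSortA [m, e] = if m ≤ PySem.Str.lower e then [m, e] else [e, m] := by
  unfold pvSortA
  split_ifs with hle
  · refine PySem.List.sorted_eq_self_of_pairwise _ _ ?_
    refine List.Pairwise.cons ?_ (List.pairwise_singleton _ _)
    intro b hb
    rw [List.mem_singleton] at hb
    subst hb
    rw [hm]
    exact hle
  · refine PySem.List.sorted_eq_of_perm_of_pairwise_lt _ _ _ (List.Perm.swap _ _ _) ?_
    refine List.Pairwise.cons ?_ (List.pairwise_singleton _ _)
    intro b hb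
    rw [List.mem_singleton] at hb
    subst hb
    rw [hm]
    exact not_le.mp hle

theorem pv_bsearch_none (m v : String) (knihovna : List String) (lo hi : Int)
    (h : hi < lo) : pvBsearch m v knihovna lo hi = none := by
  rw [pvBsearch]
  simp [not_le.mpr h]

-- the core: A's recursive search on the window knihovna[lo : lo+n] equals B's iterative
-- search with bounds lo, lo+n-1
theorem pv_search_eq (v : String) (knihovna : List String) :
    ∀ (n lo : Nat), lo + n ≤ knihovna.length →
      pvPorovnani v ((knihovna.drop lo).take n) =
        pvBsearch (PySem.Str.lower v) v knihovna (lo : Int) ((lo : Int) + (n : Int) - 1) := by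
  intro n
  induction n using Nat.strong_induction_on with
  | _ n IH =>
  intro lo hle
  have hm : PySem.Str.lower (PySem.Str.lower v) = PySem.Str.lower v := pv_lower_idem v
  rcases Nat.eq_zero_or_pos n with hn0 | hnpos
  · subst hn0
    rw [pvPorovnani, pv_bsearch_none _ _ _ _ _ (by omega)]
    simp
  -- n ≥ 1: window facts
  have hw : ((knihovna.drop lo).take n).length = n := by
    simp only [List.length_take, List.length_drop]; omega
  have hmidlt : lo + n / 2 < knihovna.length := by omega
  have hget : PySem.List.pyGetD ((knihovna.drop lo).take n) ((n / 2 : Nat) : Int) "" =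
      PySem.List.pyGetD knihovna ((lo + n / 2 : Nat) : Int) "" := by
    rw [PySem.List.pyGetD_natCast, PySem.List.pyGetD_natCast,
      List.getD_eq_getElem _ _ (by omega), List.getD_eq_getElem _ _ (by omega)]
    simp [List.getElem_take, List.getElem_drop]
  -- unfold B one step
  rw [pvBsearch]
  have hcond : (lo : Int) ≤ (lo : Int) + (n : Int) - 1 := by omega
  rw [if_pos hcond]
  have harg : ((lo : Int) + (n : Int) - 1) - (lo : Int) + 1 = ((n : Nat) : Int) := by ring
  simp only [harg]
  have hfd : PySem.Int.floordiv ((n : Nat) : Int) 2 = ((n / 2 : Nat) : Int) := by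
    exact_mod_cast PySem.Int.floordiv_natCast n 2
  simp only [hfd]
  have hmidc : (lo : Int) + ((n / 2 : Nat) : Int) = ((lo + n / 2 : Nat) : Int) := by push_cast; ring
  simp only [hmidc]
  set m := PySem.Str.lower v with hmdef
  set e := PySem.List.pyGetD knihovna ((lo + n / 2 : Nat) : Int) "" with hedef
  rcases Nat.lt_or_ge n 2 with hn1 | hn2
  · -- n = 1
    have hn : n = 1 := by omega
    subst hn
    rw [pvPorovnani]
    simp only [hw, Nat.lt_irrefl, if_false]
    have h0 : PySem.List.pyGetD ((knihovna.drop lo).take 1) 0 "" = e := by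
      have := hget; simpa using this
    rw [h0, ← hmdef]
    by_cases hme : m = e
    · simp [hme]
    · rw [if_neg hme, if_neg hme,
        pv_bsearch_none _ _ _ _ _ (by push_cast; omega),
        pv_bsearch_none _ _ _ _ _ (by push_cast; omega)]
      simp
  · -- n ≥ 2
    rw [pvPorovnani]
    simp only [hw]
    rw [if_neg (by omega), if_neg (by omega)]
    rw [hget, ← hmdef]
    by_cases hme : m = e
    · simp [hme]
    · rw [if_neg hme, if_neg hme]
      rw [pv_sort_pair m e hm]
      by_cases hcmp : m ≤ PySem.Str.lower e
      · rw [if_pos hcmp, if_pos hcmp]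
        rw [if_pos (show m = PySem.List.pyGetD [m, e] 0 "" by simp [PySem.List.pyGetD_ofNat'])]
        have hsl : PySem.List.slice ((knihovna.drop lo).take n) none (some ((n / 2 : Nat) : Int)) =
            (knihovna.drop lo).take (n / 2) := by
          rw [PySem.List.slice_to_natCast, List.take_take]
          congr 1; omega
        rw [hsl, IH (n / 2) (by omega) lo (by omega)]
        congr 1
      · rw [if_neg hcmp, if_neg hcmp]
        rw [if_neg (show ¬ m = PySem.List.pyGetD [e, m] 0 "" by
            simpa [PySem.List.pyGetD_ofNat'] using hme),
          if_pos (show m = PySem.List.pyGetD [e, m] 1 "" by simp [PySem.List.pyGetD_ofNat'])]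
        have hc : ((n / 2 : Nat) : Int) + 1 = ((n / 2 + 1 : Nat) : Int) := by push_cast; ring
        rw [hc]
        have hsl : PySem.List.slice ((knihovna.drop lo).take n) (some ((n / 2 + 1 : Nat) : Int)) none =
            (knihovna.drop (lo + (n / 2 + 1))).take (n - (n / 2 + 1)) := by
          rw [PySem.List.slice_from_natCast, List.drop_take, List.drop_drop]
        rw [hsl, IH (n - (n / 2 + 1)) (by omega) (lo + (n / 2 + 1)) (by omega)]
        congr 2
        all_goals push_cast; omega

theorem pv_search_eq_full (v : String) (knihovna : List String) :
    pvPorovnani v knihovna =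
      pvBsearch (PySem.Str.lower v) v knihovna 0 ((knihovna.length : Int) - 1) := by
  have h := pv_search_eq v knihovna knihovna.length 0 (by omega)
  simpa using h

-- the swap word built by A (pop/insert/concat) equals the one built by B (slices)
theorem pv_swap_eq (cs : List Char) (i : Nat) (h : i + 1 < cs.length) :
    (PySem.List.insert (cs.eraseIdx i) ((i : Int) + 1) cs[i]).foldl (fun acc k => acc ++ [k]) [] =
      PySem.List.slice cs none (some (i : Int)) ++
        [PySem.List.pyGetD cs ((i : Int) + 1) ' '] ++ [PySem.List.pyGetD cs (i : Int) ' '] ++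
        PySem.List.slice cs (some ((i : Int) + 2)) none := by
  have c1 : ((i : Int) + 1) = ((i + 1 : Nat) : Int) := by push_cast; ring
  have c2 : ((i : Int) + 2) = ((i + 2 : Nat) : Int) := by push_cast; ring
  rw [PySem.List.foldl_append_singleton, c1, c2,
    PySem.List.insert_natCast _ _ _ (by rw [List.length_eraseIdx_of_lt (by omega)]; omega),
    PySem.List.slice_to_natCast, PySem.List.slice_from_natCast,
    PySem.List.pyGetD_natCast, PySem.List.pyGetD_natCast,
    List.eraseIdx_eq_take_drop_succ,
    List.drop_eq_getElem_cons h]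
  rw [List.getD_eq_getElem _ _ (by omega), List.getD_eq_getElem _ _ (by omega)]
  rw [List.take_append, List.drop_append]
  simp [List.length_take, Nat.min_eq_left (by omega : i ≤ cs.length), List.take_take,
    List.drop_take, List.take_one_drop_eq_of_lt_length, h]

-- the outer loops agree
theorem pv_loop_eq (slovo : String) (knihovna : List String) :
    ∀ (fuel index : Nat) (kam : List String),
      (slovo.toList.length - 1) - index = fuel →
      pvTlcLoop slovo knihovna index kam =
        (List.range' index fuel).foldl (fun (kam : List String) (i : Nat) =>
          let cs := slovo.toList
          let v := String.ofList (PySem.List.slice cs none (some (i : Int)) ++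
            [PySem.List.pyGetD cs ((i : Int) + 1) ' '] ++ [PySem.List.pyGetD cs (i : Int) ' '] ++
            PySem.List.slice cs (some ((i : Int) + 2)) none)
          let m := PySem.Str.lower v
          match pvBsearch m v knihovna 0 (knihovna.length - 1) with
          | some w => if w ∉ kam then kam ++ [w] else kam
          | none => kam) kam := by
  intro fuel
  induction fuel with
  | zero =>
    intro index kam hf
    rw [pvTlcLoop]
    rw [dif_neg (by rw [PySem.Str.len_eq]; omega)]
    simp [List.range']
  | succ fuel ih =>
    intro index kam hf
    have hlt : index + 1 < slovo.toList.length := by omega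
    rw [pvTlcLoop]
    rw [dif_pos (by rw [PySem.Str.len_eq]; omega)]
    rw [PySem.List.pop?_natCast _ _ (by omega : index < slovo.toList.length)]
    dsimp only
    rw [pv_swap_eq slovo.toList index hlt]
    rw [List.range'_succ, List.foldl_cons]
    rw [ih (index + 1) _ (by omega)]
    congr 1
    dsimp only
    rw [pv_search_eq_full]
    rcases hbs : pvBsearch (PySem.Str.lower (String.ofList
        (PySem.List.slice slovo.toList none (some (index : Int)) ++
          [PySem.List.pyGetD slovo.toList ((index : Int) + 1) ' '] ++
          [PySem.List.pyGetD slovo.toList (index : Int) ' '] ++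
          PySem.List.slice slovo.toList (some ((index : Int) + 2)) none)))
        (String.ofList
        (PySem.List.slice slovo.toList none (some (index : Int)) ++
          [PySem.List.pyGetD slovo.toList ((index : Int) + 1) ' '] ++
          [PySem.List.pyGetD slovo.toList (index : Int) ' '] ++
          PySem.List.slice slovo.toList (some ((index : Int) + 2)) none))
        knihovna 0 ((knihovna.length : Int) - 1) with _ | w
    · rfl
    · rfl

-- ===== VERDICT (by name: the statement is the Claim_ definition above) =====
theorem two_letter_change_spec : Claim_equal_two_letter_change := by
  intro slovo knihovna kam _
  unfold Spec_two_letter_change two_letter_change two_letter_change_alt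
  rw [pv_loop_eq slovo knihovna (slovo.toList.length - 1) 0 kam (by omega)]
  rw [List.range_eq_range']
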